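-- pv_equiv track=rewrite | github.com/kamazoun/algorithms | epi/9.py | is_constructible
-- ===== SOURCE A (Python) =====
-- import collections
--
-- def is_constructible(l, m):
--     if not l or not m:
--         return False
--
--     if len(l) > len(m):
--         return False
--
--     d_l = collections.defaultdict(int)
--     d_m = collections.defaultdict(int)
--
--     for c in l:
--         d_l[c] += 1
--
--     for c in m:
--         d_m[c] += 1
--
--     for k in d_l.keys():
--         if d_l[k] > d_m[k]: # If d_m[k] doesn't it value will be 0 instead of throwing KeyError like a normal dict
--             return False
--
--     return True
-- ===== SOURCE B (Python) =====
-- def is_constructible(l, m):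
--     if not l or not m:
--         return False
--     if len(l) > len(m):
--         return False
--     a, b = sorted(l), sorted(m)
--     i = j = 0
--     while i < len(a):
--         if j == len(b):
--             return False
--         if b[j] < a[i]:
--             j += 1
--         elif b[j] == a[i]:
--             i += 1
--             j += 1
--         else:
--             return False
--     return True
-- ===== Notes on version B (the rewrite author's own statement) =====
-- stated objective: alternative
-- what changed: B sorts both strings and decides multiset inclusion by a two-pointer merge scan over the sorted sequences, using no counters or dictionaries at all.
import Mathlib
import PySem

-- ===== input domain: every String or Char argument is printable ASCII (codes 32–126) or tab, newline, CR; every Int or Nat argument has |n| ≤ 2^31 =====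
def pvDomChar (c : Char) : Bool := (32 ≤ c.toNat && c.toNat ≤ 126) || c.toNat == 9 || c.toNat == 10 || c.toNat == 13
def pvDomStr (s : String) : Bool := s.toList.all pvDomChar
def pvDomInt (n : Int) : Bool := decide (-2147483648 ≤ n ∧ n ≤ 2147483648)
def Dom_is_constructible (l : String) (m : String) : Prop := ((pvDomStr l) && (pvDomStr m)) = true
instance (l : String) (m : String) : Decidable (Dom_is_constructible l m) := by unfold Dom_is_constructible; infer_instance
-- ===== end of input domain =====

-- B sorts both strings and decides multiset inclusion by a two-pointer merge scan over the
-- sorted sequences (no counters or dictionaries), instead of building two count maps and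
-- comparing them key by key (alternative algorithm, same result).


-- ===== PORT A =====
def is_constructible (l : String) (m : String) : Bool :=
  if l.toList = [] ∨ m.toList = [] then false
  else if PySem.Str.len l > PySem.Str.len m then false
  else
    let d_l := PySem.Dict.counter l.toList
    let d_m := PySem.Dict.counter m.toList
    -- for k in d_l.keys(): if d_l[k] > d_m[k]: return False ... return True
    d_l.keys.all (fun k => !(d_l.getD k 0 > d_m.getD k 0))

-- ===== PORT B =====
-- the two-pointer merge scan over the two sorted character sequences (the while loop of Source B,
-- written as the equivalent structural recursion on the suffixes a[i:], b[j:])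
def pvCovers : List Char → List Char → Bool
  | [], _ => true
  | _ :: _, [] => false
  | c :: cs, d :: ds =>
    if d < c then pvCovers (c :: cs) ds
    else if d = c then pvCovers cs ds
    else false

def is_constructible_alt (l : String) (m : String) : Bool :=
  if l.toList = [] ∨ m.toList = [] then false
  else if PySem.Str.len l > PySem.Str.len m then false
  else pvCovers (PySem.List.sorted l.toList (fun x => x) false)
                (PySem.List.sorted m.toList (fun x => x) false)

-- ===== PRECONDITION & SPEC =====
def Spec_is_constructible (l : String) (m : String) (out : Bool) : Prop := out = is_constructible_alt l m
instance (l : String) (m : String) (out : Bool) : Decidable (Spec_is_constructible l m out) := by unfold Spec_is_constructible; infer_instance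

-- ===== CLAIM =====
def Claim_equal_is_constructible : Prop := ∀ (l : String) (m : String), Dom_is_constructible l m → Spec_is_constructible l m (is_constructible l m)

-- ===== LEMMAS AND PROOFS =====

-- A's counter comparison decides exactly count-wise inclusion
lemma counter_check_iff (ls ms : List Char) :
    ((PySem.Dict.counter ls).keys.all
      (fun k => !((PySem.Dict.counter ls).getD k 0 > (PySem.Dict.counter ms).getD k 0)) = true)
    ↔ ∀ c, ((ls.count c : Int) ≤ (ms.count c : Int)) := by
  rw [List.all_eq_true]
  constructor
  · intro h c
    by_cases hc : c ∈ ls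
    · have hk : c ∈ (PySem.Dict.counter ls).keys := by
        rw [PySem.Dict.keys_counter]; simpa [PySem.Set.mem_ofList] using hc
      have := h c hk
      simp only [PySem.Dict.getD_counter] at this
      simpa using this
    · have : ls.count c = 0 := List.count_eq_zero.mpr hc
      simp [this]
  · intro h k _
    have := h k
    simp only [PySem.Dict.getD_counter]
    simpa using this

-- B's merge scan on sorted lists decides exactly count-wise inclusion
lemma ccount (x c : Char) (cs : List Char) :
    (c :: cs).count x = cs.count x + (if c = x then 1 else 0) := by
  by_cases h : c = x <;> simp [h]

lemma pvCovers_iff (b a : List Char)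
    (ha : a.Pairwise (· ≤ ·)) (hb : b.Pairwise (· ≤ ·)) :
    pvCovers a b = true ↔ ∀ c, a.count c ≤ b.count c := by
  induction b generalizing a with
  | nil =>
    cases a with
    | nil => simp [pvCovers]
    | cons c cs =>
      simp only [pvCovers]
      constructor
      · intro h; cases h
      · intro h
        have := h c
        rw [ccount, if_pos rfl] at this
        simp at this
  | cons d ds ih =>
    cases a with
    | nil => simp [pvCovers]
    | cons c cs =>
      have ha' : cs.Pairwise (· ≤ ·) := ha.of_cons
      have hb' : ds.Pairwise (· ≤ ·) := hb.of_cons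
      have haMem : ∀ x ∈ cs, c ≤ x := fun x hx => List.rel_of_pairwise_cons ha hx
      have hbMem : ∀ x ∈ ds, d ≤ x := fun x hx => List.rel_of_pairwise_cons hb hx
      by_cases hdc : d < c
      · -- b's head is strictly below a's head: skip it; d occurs nowhere in a
        have hda : d ∉ c :: cs := by
          intro hmem
          rcases List.mem_cons.mp hmem with h | h
          · exact (ne_of_lt hdc) h
          · exact absurd (haMem d h) (not_le.mpr hdc)
        have hcount : (c :: cs).count d = 0 := List.count_eq_zero.mpr hda
        simp only [pvCovers, if_pos hdc]
        rw [ih (c :: cs) ha hb']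
        constructor
        · intro h x
          rw [ccount x d ds]
          have := h x; omega
        · intro h x
          have := h x
          rw [ccount x d ds] at this
          by_cases hx : d = x
          · subst hx; exact hcount ▸ Nat.zero_le _
          · rw [if_neg hx] at this; omega
      · by_cases heq : d = c
        · subst heq
          simp only [pvCovers, if_neg hdc]
          rw [if_pos trivial, ih cs ha' hb']
          constructor
          · intro h x
            rw [ccount, ccount]
            have := h x; omega
          · intro h x
            have := h x
            rw [ccount, ccount] at this
            omega
        · -- d > c: c occurs nowhere in b, but count c a ≥ 1
          have hcb : c ∉ d :: ds := by
            intro hmem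
            rcases List.mem_cons.mp hmem with h | h
            · exact heq h.symm
            · have := hbMem c h
              have hdc' : c < d := lt_of_le_of_ne (le_of_not_gt hdc) (fun h' => heq h'.symm)
              exact absurd this (not_le.mpr hdc')
          have hcount : (d :: ds).count c = 0 := List.count_eq_zero.mpr hcb
          simp only [pvCovers, if_neg hdc, if_neg heq]
          constructor
          · intro h; cases h
          · intro h
            have := h c
            rw [hcount, ccount, if_pos rfl] at this
            simp at this

theorem pv_main (l m : String) : is_constructible l m = is_constructible_alt l m := by
  unfold is_constructible is_constructible_alt
  split_ifs with h1 h2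
  · rfl
  · rfl
  · simp only
    have hperm_l := PySem.List.sorted_perm l.toList (fun x => x) false
    have hperm_m := PySem.List.sorted_perm m.toList (fun x => x) false
    have hpl : (PySem.List.sorted l.toList (fun x => x) false).Pairwise (· ≤ ·) :=
      PySem.List.sorted_pairwise l.toList (fun x => x)
    have hpm : (PySem.List.sorted m.toList (fun x => x) false).Pairwise (· ≤ ·) :=
      PySem.List.sorted_pairwise m.toList (fun x => x)
    by_cases hc : ∀ c, l.toList.count c ≤ m.toList.count c
    · rw [(counter_check_iff l.toList m.toList).mpr (fun c => by exact_mod_cast hc c),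
        (pvCovers_iff _ _ hpl hpm).mpr
          (fun c => by rw [hperm_l.count_eq, hperm_m.count_eq]; exact hc c)]
    · have ha : ¬ ((PySem.Dict.counter l.toList).keys.all
          (fun k => !((PySem.Dict.counter l.toList).getD k 0 > (PySem.Dict.counter m.toList).getD k 0)) = true) := by
        rw [counter_check_iff]
        intro h; exact hc (fun c => by exact_mod_cast h c)
      have hb : ¬ (pvCovers (PySem.List.sorted l.toList (fun x => x) false)
          (PySem.List.sorted m.toList (fun x => x) false) = true) := by
        rw [pvCovers_iff _ _ hpl hpm]
        intro h
        exact hc (fun c => by rw [← hperm_l.count_eq, ← hperm_m.count_eq]; exact h c)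
      simp only [Bool.not_eq_true] at ha hb
      rw [ha, hb]

-- ===== VERDICT =====
theorem is_constructible_spec : Claim_equal_is_constructible := by
  intro l m _
  unfold Spec_is_constructible
  exact pv_main l m
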